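-- pv_equiv track=rewrite | github.com/cyberthreatgurl/handheld-radio-tracker | radios/views_import.py | parse_fcc_id
-- ===== SOURCE A (Python) =====
-- def parse_fcc_id(fcc_id, grantee_map):
--     fcc_id = fcc_id.strip()
--     grantee_code = None
--     for code in sorted(grantee_map.keys(), key=len, reverse=True):
--         if fcc_id.startswith(code):
--             grantee_code = code
--             break
--     if not grantee_code:
--         return None, fcc_id
--     # Remove grantee code prefix, and if next char is a dash, remove it too
--     model = fcc_id[len(grantee_code):].lstrip('-').strip()
--     return grantee_code, model
-- ===== SOURCE B (Python) =====
-- def parse_fcc_id(fcc_id, grantee_map):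
--     fcc_id = fcc_id.strip()
--     best = None
--     for code in grantee_map:
--         if code and fcc_id.startswith(code) and (best is None or len(code) > len(best)):
--             best = code
--     if best is None:
--         return None, fcc_id
--     model = fcc_id[len(best):].lstrip('-').strip()
--     return best, model
-- ===== Notes on version B (the rewrite author's own statement) =====
-- stated objective: alternative
-- what changed: B replaces A's sort-all-keys-by-length-then-scan-for-first-prefix-match with a single unsorted pass over the keys that keeps the longest nonempty matching prefix.
import Mathlib
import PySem

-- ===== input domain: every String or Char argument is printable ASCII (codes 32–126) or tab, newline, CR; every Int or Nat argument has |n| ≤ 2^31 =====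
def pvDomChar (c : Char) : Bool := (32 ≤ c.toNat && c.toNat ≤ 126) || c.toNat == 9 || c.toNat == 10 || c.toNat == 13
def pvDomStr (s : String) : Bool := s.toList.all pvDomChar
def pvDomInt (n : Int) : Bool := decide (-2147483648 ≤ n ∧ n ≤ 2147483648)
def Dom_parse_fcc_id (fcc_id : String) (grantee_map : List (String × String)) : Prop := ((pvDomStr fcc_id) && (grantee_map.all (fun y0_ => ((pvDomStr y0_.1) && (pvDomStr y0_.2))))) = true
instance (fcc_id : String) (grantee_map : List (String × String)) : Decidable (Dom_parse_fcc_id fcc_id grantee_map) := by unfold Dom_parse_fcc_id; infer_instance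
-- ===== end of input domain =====

-- B replaces A's sort-keys-by-length-then-take-first-prefix-match with a single unsorted
-- pass keeping the longest nonempty matching prefix; return values proved equal on all inputs.

-- ===== PORT A =====
-- model = fcc_id[len(code):].lstrip('-').strip()
-- fcc_id[n:] with 0 ≤ n is List.drop n; lstrip('-') drops leading '-' chars (exact: the char set is {'-'})
def pvModelA (fcc : String) (code : String) : String :=
  String.ofList (PySem.Chars.strip ((fcc.toList.drop code.toList.length).dropWhile (· == '-')))

def parse_fcc_id (fcc_id : String) (grantee_map : List (String × String)) : Option String × String :=
  let fcc := PySem.Str.strip fcc_id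
  -- for code in sorted(grantee_map.keys(), key=len, reverse=True): if fcc.startswith(code): break
  let grantee_code :=
    (PySem.List.sorted (PySem.List.dedup (grantee_map.map Prod.fst)) (fun c => PySem.Str.len c) true).find?
      (fun code => PySem.Str.startswith fcc code)
  match grantee_code with
  | none => (none, fcc)                                   -- if not grantee_code (None)
  | some code =>
    if code = "" then (none, fcc)                          -- if not grantee_code ('' is falsy)
    else (some code, pvModelA fcc code)

-- ===== PORT B =====
-- same tail line of Source B: model = fcc_id[len(best):].lstrip('-').strip()
def pvModelB (fcc : String) (best : String) : String :=
  String.ofList (PySem.Chars.strip ((fcc.toList.drop best.toList.length).dropWhile (· == '-')))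

-- best is None or len(code) > len(best)
def pvBetter (best : Option String) (code : String) : Bool :=
  match best with
  | none => true
  | some b => decide (PySem.Str.len b < PySem.Str.len code)

-- if code and fcc_id.startswith(code) and (best is None or len(code) > len(best)): best = code
def pvStep (fcc : String) (best : Option String) (code : String) : Option String :=
  if code != "" && PySem.Str.startswith fcc code && pvBetter best code then some code else best

def parse_fcc_id_alt (fcc_id : String) (grantee_map : List (String × String)) : Option String × String :=
  let fcc := PySem.Str.strip fcc_id
  -- for code in grantee_map:  (iterating a dict yields its distinct keys in first-occurrence order)
  let best := (PySem.List.dedup (grantee_map.map Prod.fst)).foldl (pvStep fcc) none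
  match best with
  | none => (none, fcc)
  | some code => (some code, pvModelB fcc code)

-- ===== PRECONDITION & SPEC =====
def Spec_parse_fcc_id (fcc_id : String) (grantee_map : List (String × String)) (out : Option String × String) : Prop := out = parse_fcc_id_alt fcc_id grantee_map
instance (fcc_id : String) (grantee_map : List (String × String)) (out : Option String × String) : Decidable (Spec_parse_fcc_id fcc_id grantee_map out) := by unfold Spec_parse_fcc_id; infer_instance

-- ===== CLAIM (what is proved, stated in full; the proofs are below) =====
def Claim_equal_parse_fcc_id : Prop := ∀ (fcc_id : String) (grantee_map : List (String × String)), Dom_parse_fcc_id fcc_id grantee_map → Spec_parse_fcc_id fcc_id grantee_map (parse_fcc_id fcc_id grantee_map)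

-- ===== LEMMAS AND PROOFS =====

-- the nonempty-prefix-match predicate both programs search for
def pvMatch (fcc c : String) : Prop := c ≠ "" ∧ PySem.Str.startswith fcc c = true

-- r is the result both searches must produce: none iff no key matches, else a matching key of maximal length
def pvIsBest (fcc : String) (keys : List String) (r : Option String) : Prop :=
  (r = none ∧ ∀ c ∈ keys, ¬ pvMatch fcc c) ∨
  (∃ c, r = some c ∧ c ∈ keys ∧ pvMatch fcc c ∧
    ∀ c' ∈ keys, pvMatch fcc c' → c'.toList.length ≤ c.toList.length)

-- two prefixes of fcc of equal length are equal
theorem pvMatch_len_eq (fcc c c' : String)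
    (h : pvMatch fcc c) (h' : pvMatch fcc c') (hl : c.toList.length = c'.toList.length) : c = c' := by
  rcases h with ⟨-, h⟩; rcases h' with ⟨-, h'⟩
  rw [PySem.Str.startswith_eq, PySem.Chars.startswith_iff] at h h'
  rw [← String.toList_inj]
  exact List.IsPrefix.eq_of_length (List.prefix_of_prefix_length_le h h' (le_of_eq hl)) hl

theorem pvIsBest_unique (fcc : String) (keys : List String) (r r' : Option String)
    (h : pvIsBest fcc keys r) (h' : pvIsBest fcc keys r') : r = r' := by
  rcases h with ⟨hr, hno⟩ | ⟨c, hr, hc, hm, hmax⟩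
  · rcases h' with ⟨hr', -⟩ | ⟨c', hr', hc', hm', -⟩
    · rw [hr, hr']
    · exact absurd hm' (hno c' hc')
  · rcases h' with ⟨hr', hno'⟩ | ⟨c', hr', hc', hm', hmax'⟩
    · exact absurd hm (hno' c hc)
    · rw [hr, hr']
      exact congrArg some (pvMatch_len_eq fcc c c' hm hm'
        (le_antisymm (hmax' c hc hm) (hmax c' hc' hm')))

theorem pvFold_spec (fcc : String) (keys : List String) :
    ∀ acc : Option String, (∀ b, acc = some b → pvMatch fcc b) →
    (∀ c, keys.foldl (pvStep fcc) acc = some c → pvMatch fcc c) ∧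
    (∀ c, keys.foldl (pvStep fcc) acc = some c → c ∈ keys ∨ acc = some c) ∧
    (∀ c ∈ keys, pvMatch fcc c →
       ∃ b, keys.foldl (pvStep fcc) acc = some b ∧ c.toList.length ≤ b.toList.length) ∧
    (∀ b, acc = some b →
       ∃ b', keys.foldl (pvStep fcc) acc = some b' ∧ b.toList.length ≤ b'.toList.length) := by
  induction keys with
  | nil =>
    intro acc hacc
    refine ⟨fun c hc => hacc c hc, fun c hc => Or.inr hc, by simp, ?_⟩
    intro b hb; exact ⟨b, hb, le_refl _⟩
  | cons k rest ih =>
    intro acc hacc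
    simp only [List.foldl_cons]
    by_cases hg : (k != "" && PySem.Str.startswith fcc k && pvBetter acc k) = true
    · have hstep : pvStep fcc acc k = some k := by unfold pvStep; rw [if_pos hg]
      rw [hstep]
      have hmk : pvMatch fcc k := by
        simp only [Bool.and_eq_true, bne_iff_ne] at hg
        exact ⟨hg.1.1, hg.1.2⟩
      obtain ⟨i1, i2, i3, i4⟩ := ih (some k) (by rintro b ⟨rfl⟩; exact hmk)
      refine ⟨i1, ?_, ?_, ?_⟩
      · intro c hc
        rcases i2 c hc with h | h
        · exact Or.inl (List.mem_cons_of_mem _ h)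
        · exact Or.inl (by simp at h; simp [h])
      · intro c hc hm
        rcases List.mem_cons.mp hc with rfl | hc'
        · exact i4 c rfl
        · exact i3 c hc' hm
      · intro b hb
        obtain ⟨b', hb', hle⟩ := i4 k rfl
        refine ⟨b', hb', ?_⟩
        simp only [Bool.and_eq_true, pvBetter] at hg
        rcases hg with ⟨-, hbet⟩
        rw [hb] at hbet
        simp only [decide_eq_true_eq, PySem.Str.len_eq] at hbet
        have : b.toList.length < k.toList.length := by exact_mod_cast hbet
        exact le_trans (le_of_lt this) hle
    · have hstep : pvStep fcc acc k = acc := by unfold pvStep; rw [if_neg hg]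
      rw [hstep]
      obtain ⟨i1, i2, i3, i4⟩ := ih acc hacc
      refine ⟨i1, ?_, ?_, i4⟩
      · intro c hc
        rcases i2 c hc with h | h
        · exact Or.inl (List.mem_cons_of_mem _ h)
        · exact Or.inr h
      · intro c hc hm
        rcases List.mem_cons.mp hc with rfl | hc'
        · -- the guard failed although c matches: acc already holds something at least as long
          rcases hm with ⟨hne, hsw⟩
          have hbet : pvBetter acc c = false := by
            cases hpb : pvBetter acc c
            · rfl
            · exact absurd (by rw [hsw, hpb]; simp [bne_iff_ne, hne]) hg
          match hacc2 : acc with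
          | none => simp [pvBetter] at hbet
          | some b =>
            have hble : c.toList.length ≤ b.toList.length := by
              simp only [pvBetter, decide_eq_false_iff_not, not_lt, PySem.Str.len_eq] at hbet
              exact_mod_cast hbet
            obtain ⟨b', hb', hle⟩ := i4 b rfl
            exact ⟨b', hb', le_trans hble hle⟩
        · exact i3 c hc' hm
  
theorem pvFold_isBest (fcc : String) (keys : List String) :
    pvIsBest fcc keys (keys.foldl (pvStep fcc) none) := by
  obtain ⟨i1, i2, i3, i4⟩ := pvFold_spec fcc keys none (by simp)
  match h : keys.foldl (pvStep fcc) none with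
  | none =>
    left
    refine ⟨rfl, fun c hc hm => ?_⟩
    obtain ⟨b, hb, -⟩ := i3 c hc hm
    rw [h] at hb; cases hb
  | some c =>
    right
    refine ⟨c, rfl, ?_, i1 c h, ?_⟩
    · rcases i2 c h with hmem | hcon
      · exact hmem
      · cases hcon
    · intro c' hc' hm'
      obtain ⟨b, hb, hle⟩ := i3 c' hc' hm'
      rw [h] at hb
      injection hb with hb; rw [hb]; exact hle

-- A's effective pick (first startswith match in the length-descending sort, '' demoted to none) is best
theorem pvSorted_isBest (fcc : String) (keys : List String) :
    pvIsBest fcc keys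
      (match (PySem.List.sorted keys (fun c => PySem.Str.len c) true).find?
          (fun code => PySem.Str.startswith fcc code) with
        | none => none
        | some code => if code = "" then none else some code) := by
  match h : (PySem.List.sorted keys (fun c => PySem.Str.len c) true).find?
      (fun code => PySem.Str.startswith fcc code) with
  | none =>
    left
    refine ⟨rfl, fun c hc hm => ?_⟩
    have := List.find?_eq_none.mp h c ((PySem.List.mem_sorted keys _ true c).mpr hc)
    exact this hm.2
  | some code =>
    obtain ⟨hp, as, bs, hsplit, hfst⟩ := List.find?_eq_some_iff_append.mp h
    -- every later element of the sort has key ≤ key code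
    have hpw := PySem.List.sorted_pairwise_rev keys (fun c => PySem.Str.len c)
    rw [hsplit] at hpw
    have hbs : ∀ x ∈ bs, PySem.Str.len x ≤ PySem.Str.len code := by
      have := (List.pairwise_append.mp hpw).2.1
      intro x hx
      exact (List.pairwise_cons.mp this).1 x hx
    -- any matching key strictly longer than code would have been found earlier
    have hmax : ∀ c' ∈ keys, pvMatch fcc c' → c'.toList.length ≤ code.toList.length := by
      intro c' hc' hm'
      have hmem : c' ∈ as ++ code :: bs := by
        rw [← hsplit]; exact (PySem.List.mem_sorted keys _ true c').mpr hc'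
      rcases List.mem_append.mp hmem with hin | hin
      · exact absurd hm'.2 (by simpa using hfst c' hin)
      · rcases List.mem_cons.mp hin with rfl | hin
        · exact le_refl _
        · have := hbs c' hin
          simp only [PySem.Str.len_eq] at this
          exact_mod_cast this
    show pvIsBest fcc keys (if code = "" then none else some code)
    by_cases hemp : code = ""
    · rw [if_pos hemp]
      subst hemp
      left
      refine ⟨rfl, fun c hc hm => ?_⟩
      have := hmax c hc hm
      simp only [String.toList_empty, List.length_nil, Nat.le_zero, List.length_eq_zero_iff] at this
      exact hm.1 (String.toList_inj.mp (by simp [this]))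
    · rw [if_neg hemp]
      right
      refine ⟨code, rfl, ?_, ⟨hemp, hp⟩, hmax⟩
      have : code ∈ as ++ code :: bs := by simp
      rw [← hsplit] at this
      exact (PySem.List.mem_sorted keys _ true code).mp this

theorem pvPick_eq (fcc : String) (keys : List String) :
    (match (PySem.List.sorted keys (fun c => PySem.Str.len c) true).find?
        (fun code => PySem.Str.startswith fcc code) with
      | none => none
      | some code => if code = "" then none else some code)
    = keys.foldl (pvStep fcc) none :=
  pvIsBest_unique fcc keys _ _ (pvSorted_isBest fcc keys) (pvFold_isBest fcc keys)

-- ===== VERDICT (by name: the statement is the Claim_ definition above) =====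
theorem parse_fcc_id_spec : Claim_equal_parse_fcc_id := by
  intro fcc_id grantee_map _
  unfold Spec_parse_fcc_id
  show parse_fcc_id fcc_id grantee_map = parse_fcc_id_alt fcc_id grantee_map
  simp only [parse_fcc_id, parse_fcc_id_alt]
  rw [← pvPick_eq (PySem.Str.strip fcc_id) (PySem.List.dedup (grantee_map.map Prod.fst))]
  match h : (PySem.List.sorted (PySem.List.dedup (grantee_map.map Prod.fst))
      (fun c => PySem.Str.len c) true).find?
      (fun code => PySem.Str.startswith (PySem.Str.strip fcc_id) code) with
  | none => simp
  | some code =>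
    by_cases hemp : code = "" <;> simp [hemp, pvModelA, pvModelB]
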